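-- pv_equiv track=rewrite | github.com/pypi-data/pypi-mirror-369 | packages/pn-cho/pn_cho-0.1.0-py3-none-any.whl/pn_sequence/__init__.py | is_third_postulate_true
-- ===== SOURCE A (Python) =====
-- def is_third_postulate_true(sequence):
--     """Tests whether the sequence satisfies the second postulate
--
--     The autocorrelation function C(t) is two-valued.
--     (Menezes, Van Oorschot and Vanstone, 2018)
--
--     Args:
--         sequence: A string with a binary sequence to be tested.
--     Returns:
--         bool: Whether the sequence satisfies the third postulate
--     """
--     sequence2 = sequence[1:] + sequence[:1]
--     shift1_distance = _hamming_distance(sequence, sequence2)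
--
--     for shift in range(2, len(sequence)):
--         shifted_seq = sequence[shift:] + sequence[:shift]
--         distance = _hamming_distance(sequence, shifted_seq)
--
--         if distance != shift1_distance:
--             return False
--
--     return True
--
-- def _hamming_distance(s1, s2):
--     distance = 0
--     for i, j in zip(s1, s2):
--         if i != j:
--             distance += 1
--
--     return distance
-- ===== SOURCE B (Python) =====
-- def is_third_postulate_true(sequence):
--     # Histogram of per-shift coincidence counts over all ordered index pairs,
--     # then one table check; no rotated strings, no per-shift rescans.
--     n = len(sequence)
--     cnt = [0] * n
--     for i in range(n):
--         for j in range(n):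
--             if j != i and sequence[i] == sequence[j]:
--                 cnt[(j - i) % n] += 1
--     return all(cnt[d] == cnt[1] for d in range(2, n))
-- ===== Notes on version B (the rewrite author's own statement) =====
-- stated objective: alternative
-- what changed: Instead of building each rotated string and rescanning it per shift with early exit, B makes one pass over all ordered index pairs filling a per-shift coincidence-count histogram and then checks the table entries for shifts 2..n-1 against entry 1.
import Mathlib
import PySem

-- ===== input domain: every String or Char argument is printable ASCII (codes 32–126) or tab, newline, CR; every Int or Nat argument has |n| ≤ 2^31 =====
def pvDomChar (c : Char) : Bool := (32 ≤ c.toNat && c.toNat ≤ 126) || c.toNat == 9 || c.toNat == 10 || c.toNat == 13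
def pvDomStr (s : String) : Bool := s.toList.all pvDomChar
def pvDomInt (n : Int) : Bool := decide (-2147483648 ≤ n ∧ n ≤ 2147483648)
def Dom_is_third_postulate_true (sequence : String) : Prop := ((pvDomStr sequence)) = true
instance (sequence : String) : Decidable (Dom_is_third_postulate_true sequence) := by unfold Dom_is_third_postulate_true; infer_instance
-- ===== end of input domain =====

-- B replaces A's per-shift rotated-string rescans by one pass over all ordered index
-- pairs filling a per-shift coincidence-count histogram, then a single table check
-- (objective: alternative algorithm, same asymptotic cost).

-- ===== PORT A =====
-- helper _hamming_distance of A
def pvHamming (s1 s2 : List Char) : Nat :=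
  (s1.zip s2).foldl (fun distance ij => if ij.1 ≠ ij.2 then distance + 1 else distance) 0

def is_third_postulate_true (sequence : String) : Bool :=
  let s := sequence.toList
  let sequence2 := PySem.List.slice s (some 1) none ++ PySem.List.slice s none (some 1)
  let shift1_distance := pvHamming s sequence2
  (PySem.List.pyRange 2 (s.length : Int) 1).all fun shift =>
    let shifted_seq := PySem.List.slice s (some shift) none ++ PySem.List.slice s none (some shift)
    pvHamming s shifted_seq == shift1_distance

-- ===== PORT B =====
-- cnt[k] += 1
def pvBump (cnt : List Nat) (k : Nat) : List Nat := cnt.set k (cnt.getD k 0 + 1)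

-- the double loop of B building the per-shift coincidence-count table cnt;
-- Python's (j - i) % n is PySem.Int.mod, nonnegative here (n > 0 inside the loops), so toNat is exact
def pvCnt (s : List Char) : List Nat :=
  (List.range s.length).foldl
    (fun cnt i =>
      (List.range s.length).foldl
        (fun cnt j =>
          if j ≠ i ∧ s.getD i ' ' = s.getD j ' ' then
            pvBump cnt ((PySem.Int.mod ((j : Int) - (i : Int)) (s.length : Int)).toNat)
          else cnt)
        cnt)
    (List.replicate s.length 0)

def is_third_postulate_true_alt (sequence : String) : Bool :=
  let s := sequence.toList
  let cnt := pvCnt s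
  (List.range' 2 (s.length - 2)).all fun d => cnt.getD d 0 == cnt.getD 1 0

-- ===== PRECONDITION & SPEC =====
def Spec_is_third_postulate_true (sequence : String) (out : Bool) : Prop := out = is_third_postulate_true_alt sequence
instance (sequence : String) (out : Bool) : Decidable (Spec_is_third_postulate_true sequence out) := by unfold Spec_is_third_postulate_true; infer_instance

-- ===== CLAIM (what is proved, stated in full; the proofs are below) =====
def Claim_equal_is_third_postulate_true : Prop := ∀ (sequence : String), Dom_is_third_postulate_true sequence → Spec_is_third_postulate_true sequence (is_third_postulate_true sequence)

-- ===== LEMMAS AND PROOFS =====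

-- number of positions at which s agrees with its cyclic shift by d
def pvM (s : List Char) (d : Nat) : Nat :=
  (List.range s.length).countP (fun i => s.getD i ' ' == s.getD ((i + d) % s.length) ' ')

theorem pvM_le (s : List Char) (d : Nat) : pvM s d ≤ s.length := by
  have := List.countP_le_length (l := List.range s.length)
    (p := fun i => s.getD i ' ' == s.getD ((i + d) % s.length) ' ')
  simpa [pvM] using this

theorem pvCountP_bang {α : Type} (l : List α) (p : α → Bool) :
    l.countP (fun i => !(p i)) + l.countP p = l.length := by
  induction l with
  | nil => simp
  | cons x t ih =>
    simp only [List.countP_cons, List.length_cons]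
    by_cases h : p x <;> simp [h] <;> omega

theorem pvHamming_foldl (l : List (Char × Char)) (a : Nat) :
    l.foldl (fun distance ij => if ij.1 ≠ ij.2 then distance + 1 else distance) a
      = a + l.countP (fun ij => ij.1 != ij.2) := by
  induction l generalizing a with
  | nil => simp
  | cons x t ih =>
    simp only [List.foldl_cons, List.countP_cons, ih]
    by_cases h : x.1 = x.2 <;> simp [h] <;> omega

theorem pvZip_rot (s : List Char) (d : Nat) (hd : d ≤ s.length) :
    s.zip (s.drop d ++ s.take d)
      = (List.range s.length).map (fun i => (s.getD i ' ', s.getD ((i + d) % s.length) ' ')) := by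
  apply List.ext_getElem
  · simp only [List.length_zip, List.length_append, List.length_drop, List.length_take,
      List.length_map, List.length_range]
    omega
  · intro i h1 h2
    have hi : i < s.length := by simpa using h2
    rw [List.getElem_zip, List.getElem_map, List.getElem_range]
    refine Prod.ext ?_ ?_
    · simp [List.getD_eq_getElem?_getD, List.getElem?_eq_getElem hi]
    · by_cases hc : i < s.length - d
      · have hid : i + d < s.length := by omega
        have hmod : (i + d) % s.length = i + d := Nat.mod_eq_of_lt hid
        rw [List.getElem_append_left (by simpa using hc), List.getElem_drop]
        simp only [List.getD_eq_getElem?_getD, hmod, List.getElem?_eq_getElem hid]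
        have hcomm : d + i = i + d := Nat.add_comm d i
        simp [hcomm]
      · have hge : s.length ≤ i + d := by omega
        have hlt2 : i + d - s.length < s.length := by omega
        have hmod : (i + d) % s.length = i + d - s.length := by
          rw [Nat.mod_eq_sub_mod hge]
          exact Nat.mod_eq_of_lt hlt2
        rw [List.getElem_append_right (by simpa using hc)]
        have hidx : i - (s.drop d).length = i + d - s.length := by
          simp only [List.length_drop]
          omega
        simp only [hidx, List.getElem_take, hmod]
        simp [List.getD_eq_getElem?_getD, List.getElem?_eq_getElem hlt2]

theorem pvHamming_rot (s : List Char) (d : Nat) (hd : d ≤ s.length) :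
    pvHamming s (s.drop d ++ s.take d) = s.length - pvM s d := by
  unfold pvHamming
  rw [pvHamming_foldl, pvZip_rot s d hd, List.countP_map]
  have heq : ((fun (ij : Char × Char) => ij.1 != ij.2) ∘
      (fun i => (s.getD i ' ', s.getD ((i + d) % s.length) ' ')))
      = fun i => !(s.getD i ' ' == s.getD ((i + d) % s.length) ' ') := by
    funext i
    simp [Function.comp, bne]
  rw [heq]
  have hb := pvCountP_bang (List.range s.length)
    (fun i => s.getD i ' ' == s.getD ((i + d) % s.length) ' ')
  simp only [List.length_range] at hb
  unfold pvM
  omega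

-- (i + m) % n made explicit
theorem pvMod_cases (i m n : Nat) (_hi : i < n) (hm : m < n) :
    (i + m) % n = if i + m < n then i + m else i + m - n := by
  split
  · exact Nat.mod_eq_of_lt (by omega)
  · rw [Nat.mod_eq_sub_mod (by omega)]
    exact Nat.mod_eq_of_lt (by omega)

theorem pvShift_ne (i m n : Nat) (hi : i < n) (hm1 : 1 ≤ m) (hmn : m < n) :
    (i + m) % n ≠ i := by
  rw [pvMod_cases i m n hi hmn]
  split <;> omega

theorem pvIdx_eq_iff (n i j m : Nat) (hi : i < n) (hj : j < n) (hm1 : 1 ≤ m) (hmn : m < n) :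
    ((PySem.Int.mod ((j : Int) - (i : Int)) (n : Int)).toNat = m) ↔ j = (i + m) % n := by
  have hn0 : 0 < n := by omega
  have hn : (0 : Int) < (n : Int) := by exact_mod_cast hn0
  rw [PySem.Int.mod_eq_emod_of_pos hn]
  have h0 : (0 : Int) ≤ ((j : Int) - i) % n := Int.emod_nonneg _ (by omega)
  have hlt : ((j : Int) - i) % n < n := Int.emod_lt_of_pos _ hn
  constructor
  · intro h
    have hI : ((j : Int) - i) % n = (m : Int) := by omega
    have hj2 : ((m : Int) + i) % n = (j : Int) := by
      rw [← hI, Int.emod_add_emod]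
      have e1 : (j : Int) - i + i = (j : Int) := by ring
      rw [e1]
      exact Int.emod_eq_of_lt (by omega) (by exact_mod_cast hj)
    have hcast : (((m + i) % n : Nat) : Int) = (j : Int) := by
      rw [Int.natCast_mod]
      push_cast
      exact hj2
    have hnat : (m + i) % n = j := by exact_mod_cast hcast
    rw [Nat.add_comm i m]
    exact hnat.symm
  · intro h
    subst h
    have key : ((((i + m) % n : Nat) : Int)) % n = ((i : Int) + m) % n := by
      rw [Int.natCast_mod]
      push_cast
      exact Int.emod_emod_of_dvd _ dvd_rfl
    have hfin : ((((i + m) % n : Nat) : Int) - i) % n = (m : Int) := by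
      calc ((((i + m) % n : Nat) : Int) - i) % n
          = ((((i + m) % n : Nat) : Int) % n - (i : Int) % n) % n := by rw [← Int.sub_emod]
        _ = (((i : Int) + m) % n - (i : Int) % n) % n := by rw [key]
        _ = ((i : Int) + m - i) % n := by rw [← Int.sub_emod]
        _ = (m : Int) % n := by
              congr 1
              ring
        _ = (m : Int) := Int.emod_eq_of_lt (by omega) (by exact_mod_cast hmn)
    rw [hfin]
    exact Int.toNat_natCast m

theorem pvFoldl_if_bump (s : List Char) (i : Nat) (l : List Nat) (c : List Nat) :
    l.foldl (fun cnt j =>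
        if j ≠ i ∧ s.getD i ' ' = s.getD j ' ' then
          pvBump cnt ((PySem.Int.mod ((j : Int) - (i : Int)) (s.length : Int)).toNat)
        else cnt) c
      = (((l.filter (fun j => decide (j ≠ i ∧ s.getD i ' ' = s.getD j ' '))).map
          (fun j : Nat => (PySem.Int.mod ((j : Int) - (i : Int)) (s.length : Int)).toNat)).foldl pvBump c) := by
  induction l generalizing c with
  | nil => rfl
  | cons x t ih =>
    rw [List.foldl_cons, List.filter_cons]
    by_cases h : x ≠ i ∧ s.getD i ' ' = s.getD x ' '
    · rw [if_pos h, if_pos (by simpa using h), List.map_cons, List.foldl_cons]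
      exact ih _
    · rw [if_neg h, if_neg (by simpa using h)]
      exact ih _

theorem pvBump_getD (c : List Nat) (k m : Nat) (hk : k < c.length) :
    (pvBump c k).getD m 0 = c.getD m 0 + (if k = m then 1 else 0) := by
  unfold pvBump
  by_cases h : k = m
  · subst h
    simp [List.getD_eq_getElem?_getD, hk]
  · simp [List.getD_eq_getElem?_getD, h]

theorem pvFoldl_bump_getD (ks : List Nat) (c : List Nat) (m : Nat)
    (h : ∀ k ∈ ks, k < c.length) :
    (ks.foldl pvBump c).getD m 0 = c.getD m 0 + ks.count m := by
  induction ks generalizing c with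
  | nil => simp
  | cons k t ih =>
    rw [List.foldl_cons]
    have hk : k < c.length := h k (by simp)
    have ht : ∀ k' ∈ t, k' < (pvBump c k).length := by
      intro k' hk'
      have hlen : (pvBump c k).length = c.length := by simp [pvBump]
      rw [hlen]
      exact h k' (by simp [hk'])
    rw [ih _ ht, pvBump_getD c k m hk, List.count_cons]
    by_cases hkm : k = m <;> simp [hkm] <;> omega

theorem pvSum_map_ite (l : List Nat) (p : Nat → Bool) :
    (l.map (fun i => if p i then 1 else 0)).sum = l.countP p := by
  induction l with
  | nil => simp
  | cons x t ih =>
    simp only [List.map_cons, List.sum_cons, List.countP_cons, ih]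
    by_cases h : p x <;> simp [h] <;> omega

theorem pvKeys_count (s : List Char) (i m : Nat) (hi : i < s.length)
    (hm1 : 1 ≤ m) (hmn : m < s.length) :
    (((List.range s.length).filter (fun j => decide (j ≠ i ∧ s.getD i ' ' = s.getD j ' '))).map
        (fun j : Nat => (PySem.Int.mod ((j : Int) - (i : Int)) (s.length : Int)).toNat)).count m
      = if s.getD i ' ' == s.getD ((i + m) % s.length) ' ' then 1 else 0 := by
  rw [List.count_eq_countP, List.countP_map, List.countP_filter]
  have hcn : (i + m) % s.length < s.length := Nat.mod_lt _ (by omega)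
  have hci : (i + m) % s.length ≠ i := pvShift_ne i m s.length hi hm1 hmn
  by_cases hq : s.getD i ' ' = s.getD ((i + m) % s.length) ' '
  · rw [if_pos (by simpa using hq)]
    have hcong : ∀ j ∈ List.range s.length,
        (((fun k => k == m) ∘ fun j : Nat => (PySem.Int.mod ((j : Int) - (i : Int)) (s.length : Int)).toNat) j
          && decide (j ≠ i ∧ s.getD i ' ' = s.getD j ' ')) = true
        ↔ (j == (i + m) % s.length) = true := by
      intro j hj
      have hjn : j < s.length := by simpa using hj
      simp only [Function.comp_apply, Bool.and_eq_true, beq_iff_eq, decide_eq_true_eq]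
      constructor
      · rintro ⟨hidx, _, _⟩
        exact (pvIdx_eq_iff s.length i j m hi hjn hm1 hmn).mp hidx
      · intro hjc
        subst hjc
        exact ⟨(pvIdx_eq_iff s.length i _ m hi hjn hm1 hmn).mpr rfl, hci, hq⟩
    rw [List.countP_congr hcong]
    have h2 : (List.range s.length).countP (fun j => j == (i + m) % s.length)
        = (List.range s.length).count ((i + m) % s.length) := by
      rw [List.count_eq_countP]
    rw [h2]
    exact List.count_eq_one_of_mem List.nodup_range (by simpa using hcn)
  · rw [if_neg (by simpa using hq)]
    rw [List.countP_eq_zero]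
    intro j hj
    have hjn : j < s.length := by simpa using hj
    simp only [Function.comp_apply, Bool.and_eq_true, beq_iff_eq, decide_eq_true_eq, not_and]
    intro hidx hji
    have hje := (pvIdx_eq_iff s.length i j m hi hjn hm1 hmn).mp hidx
    subst hje
    exact fun hsij => hq hsij

theorem pvCnt_getD (s : List Char) (m : Nat) (hm1 : 1 ≤ m) (hmn : m < s.length) :
    (pvCnt s).getD m 0 = pvM s m := by
  have hfun : (fun (cnt : List Nat) (i : Nat) =>
      (List.range s.length).foldl (fun cnt j =>
        if j ≠ i ∧ s.getD i ' ' = s.getD j ' ' then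
          pvBump cnt ((PySem.Int.mod ((j : Int) - (i : Int)) (s.length : Int)).toNat)
        else cnt) cnt)
      = fun (cnt : List Nat) (i : Nat) =>
        (((List.range s.length).filter (fun j => decide (j ≠ i ∧ s.getD i ' ' = s.getD j ' '))).map
          (fun j : Nat => (PySem.Int.mod ((j : Int) - (i : Int)) (s.length : Int)).toNat)).foldl pvBump cnt := by
    funext cnt i
    exact pvFoldl_if_bump s i (List.range s.length) cnt
  have hsplit : pvCnt s = ((List.range s.length).flatMap
      (fun i : Nat => ((List.range s.length).filter (fun j => decide (j ≠ i ∧ s.getD i ' ' = s.getD j ' '))).map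
        (fun j : Nat => (PySem.Int.mod ((j : Int) - (i : Int)) (s.length : Int)).toNat))).foldl pvBump
      (List.replicate s.length 0) := by
    unfold pvCnt
    rw [hfun, ← List.foldl_flatMap]
  have hbound : ∀ k ∈ (List.range s.length).flatMap
      (fun i : Nat => ((List.range s.length).filter (fun j => decide (j ≠ i ∧ s.getD i ' ' = s.getD j ' '))).map
        (fun j : Nat => (PySem.Int.mod ((j : Int) - (i : Int)) (s.length : Int)).toNat)),
      k < (List.replicate s.length 0).length := by
    intro k hk
    simp only [List.mem_flatMap, List.mem_map] at hk
    obtain ⟨i, _, j, _, rfl⟩ := hk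
    have hn : (0 : Int) < (s.length : Int) := by
      have : 0 < s.length := by omega
      exact_mod_cast this
    rw [PySem.Int.mod_eq_emod_of_pos hn]
    have h0 : (0 : Int) ≤ ((j : Int) - i) % s.length := Int.emod_nonneg _ (by omega)
    have hlt : ((j : Int) - i) % s.length < s.length := Int.emod_lt_of_pos _ hn
    simp only [List.length_replicate]
    omega
  rw [hsplit, pvFoldl_bump_getD _ _ _ hbound, List.count_flatMap]
  have hrepl : (List.replicate s.length 0).getD m 0 = 0 := by
    rw [List.getD_eq_getElem?_getD, List.getElem?_replicate]
    split <;> rfl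
  rw [hrepl]
  have hmap : (List.map ((List.count m) ∘ fun i : Nat =>
      ((List.range s.length).filter (fun j => decide (j ≠ i ∧ s.getD i ' ' = s.getD j ' '))).map
        (fun j : Nat => (PySem.Int.mod ((j : Int) - (i : Int)) (s.length : Int)).toNat)) (List.range s.length)).sum
      = (List.map (fun i => if s.getD i ' ' == s.getD ((i + m) % s.length) ' ' then 1 else 0)
          (List.range s.length)).sum := by
    congr 1
    apply List.map_congr_left
    intro i hi
    have hin : i < s.length := by simpa using hi
    exact pvKeys_count s i m hin hm1 hmn
  rw [hmap, pvSum_map_ite]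
  simp [pvM]

theorem pvAll_A_iff (s : List Char) (hn : 3 ≤ s.length) :
    ((PySem.List.pyRange 2 (s.length : Int) 1).all fun shift =>
      pvHamming s (PySem.List.slice s (some shift) none ++ PySem.List.slice s none (some shift))
        == pvHamming s (PySem.List.slice s (some 1) none ++ PySem.List.slice s none (some 1))) = true
    ↔ (∀ d : Nat, 2 ≤ d → d < s.length → pvM s d = pvM s 1) := by
  have h1 : pvHamming s (PySem.List.slice s (some 1) none ++ PySem.List.slice s none (some 1))
      = s.length - pvM s 1 := by
    rw [PySem.List.slice_from s (by omega : (0:Int) ≤ 1), PySem.List.slice_to s (by omega : (0:Int) ≤ 1)]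
    exact pvHamming_rot s 1 (by omega)
  have helem : ∀ shift : Int, 2 ≤ shift → shift < (s.length : Int) →
      pvHamming s (PySem.List.slice s (some shift) none ++ PySem.List.slice s none (some shift))
        = s.length - pvM s shift.toNat := by
    intro shift h2 hlt
    rw [PySem.List.slice_from s (by omega), PySem.List.slice_to s (by omega)]
    exact pvHamming_rot s shift.toNat (by omega)
  rw [List.all_eq_true]
  constructor
  · intro h d hd2 hdn
    have hmem : (d : Int) ∈ PySem.List.pyRange 2 (s.length : Int) 1 := by
      rw [PySem.List.mem_pyRange_one]
      omega
    have hh := h _ hmem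
    simp only [beq_iff_eq] at hh
    rw [helem _ (by omega) (by omega), h1, Int.toNat_natCast] at hh
    have hle1 := pvM_le s 1
    have hled := pvM_le s d
    omega
  · intro h shift hmem
    rw [PySem.List.mem_pyRange_one] at hmem
    simp only [beq_iff_eq]
    rw [helem shift (by omega) (by omega), h1, h shift.toNat (by omega) (by omega)]

theorem pvAll_B_iff (s : List Char) (hn : 3 ≤ s.length) :
    ((List.range' 2 (s.length - 2)).all fun d => (pvCnt s).getD d 0 == (pvCnt s).getD 1 0) = true
    ↔ (∀ d : Nat, 2 ≤ d → d < s.length → pvM s d = pvM s 1) := by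
  rw [List.all_eq_true]
  have hc1 : (pvCnt s).getD 1 0 = pvM s 1 := pvCnt_getD s 1 (by omega) (by omega)
  constructor
  · intro h d hd2 hdn
    have hmem : d ∈ List.range' 2 (s.length - 2) := by
      rw [List.mem_range'_1]
      omega
    have hh := h d hmem
    simp only [beq_iff_eq] at hh
    rw [pvCnt_getD s d (by omega) (by omega), hc1] at hh
    exact hh
  · intro h d hmem
    rw [List.mem_range'_1] at hmem
    simp only [beq_iff_eq]
    rw [pvCnt_getD s d (by omega) (by omega), hc1]
    exact h d (by omega) (by omega)

-- ===== VERDICT (by name: the statement is the Claim_ definition above) =====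
theorem is_third_postulate_true_spec : Claim_equal_is_third_postulate_true := by
  intro sequence _
  unfold Spec_is_third_postulate_true
  by_cases hn : 3 ≤ sequence.toList.length
  · rw [Bool.eq_iff_iff]
    constructor
    · intro hA
      exact (pvAll_B_iff _ hn).mpr ((pvAll_A_iff _ hn).mp hA)
    · intro hB
      exact (pvAll_A_iff _ hn).mpr ((pvAll_B_iff _ hn).mp hB)
  · have hA : is_third_postulate_true sequence = true := by
      show ((PySem.List.pyRange 2 (sequence.toList.length : Int) 1).all fun shift =>
        pvHamming sequence.toList (PySem.List.slice sequence.toList (some shift) none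
            ++ PySem.List.slice sequence.toList none (some shift))
          == pvHamming sequence.toList (PySem.List.slice sequence.toList (some 1) none
            ++ PySem.List.slice sequence.toList none (some 1))) = true
      rw [PySem.List.pyRange_one_eq_nil (show (sequence.toList.length : Int) ≤ 2 by omega)]
      rfl
    have hB : is_third_postulate_true_alt sequence = true := by
      show ((List.range' 2 (sequence.toList.length - 2)).all fun d =>
        (pvCnt sequence.toList).getD d 0 == (pvCnt sequence.toList).getD 1 0) = true
      rw [show sequence.toList.length - 2 = 0 from by omega]
      rfl
    rw [hA, hB]
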